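-- pv_equiv track=rewrite | github.com/chyans/tripmate | backend/retrieval_augmented_ai.py | _filter_accommodation_by_focus
-- ===== SOURCE A (Python) =====
-- def _filter_accommodation_by_focus(text: str, focus: str) -> str:
--     """Filter formatted accommodation text to only show the specified category."""
--     focus_lower = focus.lower()
--     lines = text.split('\n')
--     filtered_lines = []
--     current_category = None
--     include_category = False
--
--     for line in lines:
--         line_lower = line.lower()
--         # Check if this is a category header
--         is_category = any(f"{cat}:" in line_lower for cat in ['luxury', 'mid-range', 'budget', 'cheap', 'affordable'])
--
--         if is_category:
--             current_category = line_lower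
--             # Check if this is the category we want
--             if 'luxury' in focus_lower and 'luxury' in line_lower:
--                 include_category = True
--             elif 'budget' in focus_lower and ('budget' in line_lower or 'cheap' in line_lower or 'affordable' in line_lower):
--                 include_category = True
--             elif 'mid' in focus_lower and 'mid' in line_lower:
--                 include_category = True
--             else:
--                 include_category = False
--
--         if include_category or (not is_category and current_category and include_category):
--             filtered_lines.append(line)
--
--     return '\n'.join(filtered_lines) if filtered_lines else text
-- ===== SOURCE B (Python) =====
-- def _filter_accommodation_by_focus(text: str, focus: str) -> str:
--     """Filter formatted accommodation text to only show the specified category."""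
--     focus_lower = focus.lower()
--
--     def is_header(line_lower):
--         return any(cat + ':' in line_lower for cat in ['luxury', 'mid-range', 'budget', 'cheap', 'affordable'])
--
--     def wanted(header_lower):
--         if 'luxury' in focus_lower and 'luxury' in header_lower:
--             return True
--         if 'budget' in focus_lower and ('budget' in header_lower or 'cheap' in header_lower or 'affordable' in header_lower):
--             return True
--         return 'mid' in focus_lower and 'mid' in header_lower
--
--     # Split the text into sections: each section starts at a header line (or at
--     # the top of the text, headerless) and runs to the next header.
--     lines = text.split('\n')
--     n = len(lines)
--     sections = []
--     i = 0
--     while i < n: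
--         j = i + 1
--         while j < n and not is_header(lines[j].lower()):
--             j += 1
--         hl = lines[i].lower()
--         sections.append((hl if is_header(hl) else None, lines[i:j]))
--         i = j
--     result = [ln for header, body in sections if header is not None and wanted(header) for ln in body]
--     return '\n'.join(result) if result else text
-- ===== Notes on version B (the rewrite author's own statement) =====
-- stated objective: simpler
-- what changed: Replaces A's single stateful scan carrying current_category/include_category flags with splitting the lines into header-delimited sections and concatenating the lines of sections whose header matches the focus.
import Mathlib
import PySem

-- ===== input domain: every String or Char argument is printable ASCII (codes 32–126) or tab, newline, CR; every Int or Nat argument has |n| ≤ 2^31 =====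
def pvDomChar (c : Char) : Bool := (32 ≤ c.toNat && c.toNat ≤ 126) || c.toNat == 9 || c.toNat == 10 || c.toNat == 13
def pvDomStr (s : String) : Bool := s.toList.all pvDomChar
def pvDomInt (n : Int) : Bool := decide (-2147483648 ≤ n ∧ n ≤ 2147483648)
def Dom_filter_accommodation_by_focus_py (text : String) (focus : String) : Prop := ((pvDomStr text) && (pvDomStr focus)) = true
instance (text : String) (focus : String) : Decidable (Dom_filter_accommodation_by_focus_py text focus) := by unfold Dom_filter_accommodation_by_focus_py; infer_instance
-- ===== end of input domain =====

-- B restructures A's single flag-carrying scan into a section split (header + body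
-- spans) followed by a filter-and-concatenate; objective: simpler decomposition.

-- ===== PORT A =====
-- the for-loop of A: state = (filtered_lines, current_category, include_category)
def pvALoop (focusLower : String) : List String → List String → Option String → Bool → List String
  | [], fl, _, _ => fl
  | line :: rest, fl, cur, inc =>
      let ll := PySem.Str.lower line
      let isCat := ["luxury", "mid-range", "budget", "cheap", "affordable"].any
          (fun cat => PySem.Str.isIn (cat ++ ":") ll)
      let cur' := if isCat then some ll else cur
      let inc' :=
        if isCat then
          if PySem.Str.isIn "luxury" focusLower && PySem.Str.isIn "luxury" ll then true
          else if PySem.Str.isIn "budget" focusLower &&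
              (PySem.Str.isIn "budget" ll || PySem.Str.isIn "cheap" ll || PySem.Str.isIn "affordable" ll) then true
          else if PySem.Str.isIn "mid" focusLower && PySem.Str.isIn "mid" ll then true
          else false
        else inc
      -- Python truthiness of current_category (an Optional[str]): not None and not ""
      let fl' := if inc' || (!isCat && (match cur' with | none => false | some s => decide (s ≠ "")) && inc')
                 then fl ++ [line] else fl
      pvALoop focusLower rest fl' cur' inc'

def filter_accommodation_by_focus_py (text : String) (focus : String) : String :=
  let focusLower := PySem.Str.lower focus
  -- text.split('\n'): sep is the nonempty literal "\n", so split? is always some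
  let lines := (PySem.Str.split? text "\n").getD []
  let filtered := pvALoop focusLower lines [] none false
  if filtered ≠ [] then PySem.Str.join "\n" filtered else text

-- ===== PORT B =====
def pvBIsHeader (lineLower : String) : Bool :=
  ["luxury", "mid-range", "budget", "cheap", "affordable"].any
    (fun cat => PySem.Str.isIn (cat ++ ":") lineLower)

def pvBWanted (focusLower : String) (headerLower : String) : Bool :=
  if PySem.Str.isIn "luxury" focusLower && PySem.Str.isIn "luxury" headerLower then true
  else if PySem.Str.isIn "budget" focusLower &&
      (PySem.Str.isIn "budget" headerLower || PySem.Str.isIn "cheap" headerLower || PySem.Str.isIn "affordable" headerLower) then true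
  else PySem.Str.isIn "mid" focusLower && PySem.Str.isIn "mid" headerLower

-- Source B's outer while loop: each step takes one section (its inner while-loop scan
-- of non-header lines is the takeWhile/dropWhile split of the remaining lines)
def pvBSections : List String → List (Option String × List String)
  | [] => []
  | l :: rest =>
      let body := rest.takeWhile (fun x => !pvBIsHeader (PySem.Str.lower x))
      let rest' := rest.dropWhile (fun x => !pvBIsHeader (PySem.Str.lower x))
      let hl := PySem.Str.lower l
      ((if pvBIsHeader hl then some hl else none), l :: body) :: pvBSections rest'
  termination_by ls => ls.length
  decreasing_by
    simp only [List.length_cons]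
    exact Nat.lt_succ_of_le (List.length_dropWhile_le _ _)

def filter_accommodation_by_focus_py_alt (text : String) (focus : String) : String :=
  let focusLower := PySem.Str.lower focus
  -- text.split('\n'): sep is the nonempty literal "\n", so split? is always some
  let lines := (PySem.Str.split? text "\n").getD []
  let result :=
    ((pvBSections lines).filter (fun s => match s.1 with
        | some h => pvBWanted focusLower h
        | none => false)).flatMap (fun s => s.2)
  if result ≠ [] then PySem.Str.join "\n" result else text

-- ===== PRECONDITION & SPEC =====
def Spec_filter_accommodation_by_focus_py (text : String) (focus : String) (out : String) : Prop := out = filter_accommodation_by_focus_py_alt text focus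
instance (text : String) (focus : String) (out : String) : Decidable (Spec_filter_accommodation_by_focus_py text focus out) := by unfold Spec_filter_accommodation_by_focus_py; infer_instance

-- ===== CLAIM (what is proved, stated in full; the proofs are below) =====
def Claim_equal_filter_accommodation_by_focus_py : Prop := ∀ (text : String) (focus : String), Dom_filter_accommodation_by_focus_py text focus → Spec_filter_accommodation_by_focus_py text focus (filter_accommodation_by_focus_py text focus)

-- ===== LEMMAS AND PROOFS =====

-- B's final list, as a function of the line list
def pvOut (focusLower : String) (ls : List String) : List String :=
  ((pvBSections ls).filter (fun s => match s.1 with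
      | some h => pvBWanted focusLower h
      | none => false)).flatMap (fun s => s.2)

-- A's inline if-chain computes pvBWanted
lemma pvFlag_eq (f ll : String) :
    (if PySem.Str.isIn "luxury" f && PySem.Str.isIn "luxury" ll then true
     else if PySem.Str.isIn "budget" f &&
         (PySem.Str.isIn "budget" ll || PySem.Str.isIn "cheap" ll || PySem.Str.isIn "affordable" ll) then true
     else if PySem.Str.isIn "mid" f && PySem.Str.isIn "mid" ll then true
     else false) = pvBWanted f ll := by
  unfold pvBWanted
  split_ifs <;> simp_all

-- a headerless leading block contributes nothing to B's result
lemma pvOut_dropWhile (f : String) (ls : List String) :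
    pvOut f (ls.dropWhile (fun x => !pvBIsHeader (PySem.Str.lower x))) = pvOut f ls := by
  cases ls with
  | nil => rfl
  | cons l rest =>
      by_cases h : pvBIsHeader (PySem.Str.lower l) = true
      · simp [h]
      · have hf : pvBIsHeader (PySem.Str.lower l) = false := by
          cases hx : pvBIsHeader (PySem.Str.lower l) <;> simp_all
        rw [List.dropWhile_cons]
        conv_rhs => rw [pvOut, pvBSections]
        simp [pvOut, hf, List.flatMap_def]

-- loop invariant: A's scan = accumulated prefix + pending section (if included) + B's
-- result on the rest starting at the next header
lemma pvALoop_eq (f : String) : ∀ (ls fl : List String) (cur : Option String) (inc : Bool),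
    pvALoop f ls fl cur inc =
      fl ++ (if inc then ls.takeWhile (fun x => !pvBIsHeader (PySem.Str.lower x)) else [])
         ++ pvOut f (ls.dropWhile (fun x => !pvBIsHeader (PySem.Str.lower x))) := by
  intro ls
  induction ls with
  | nil => intro fl cur inc; cases inc <;> simp [pvALoop, pvOut, pvBSections]
  | cons l rest ih =>
      intro fl cur inc
      rw [pvALoop]
      by_cases h : pvBIsHeader (PySem.Str.lower l) = true
      · have hIs : (["luxury", "mid-range", "budget", "cheap", "affordable"].any
            (fun cat => PySem.Str.isIn (cat ++ ":") (PySem.Str.lower l))) = true := h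
        simp only [hIs, if_true, Bool.not_true, Bool.false_and, Bool.or_false, pvFlag_eq]
        rw [ih]
        rw [List.takeWhile_cons, List.dropWhile_cons]
        simp only [h, Bool.not_true, Bool.false_eq_true, if_false]
        conv_rhs => rw [pvOut, pvBSections]
        simp only [h, if_true]
        cases hw : pvBWanted f (PySem.Str.lower l) <;>
          simp [pvOut, hw, List.flatMap_def, List.append_assoc]
      · have hf : pvBIsHeader (PySem.Str.lower l) = false := by
          cases hx : pvBIsHeader (PySem.Str.lower l) <;> simp_all
        have hb : (["luxury", "mid-range", "budget", "cheap", "affordable"].any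
            (fun cat => PySem.Str.isIn (cat ++ ":") (PySem.Str.lower l))) = false := hf
        simp only [hb, Bool.false_eq_true, if_false, Bool.not_false, Bool.true_and]
        rw [ih]
        rw [List.takeWhile_cons, List.dropWhile_cons]
        simp only [hf, Bool.not_false, if_true]
        cases inc <;> simp

-- ===== VERDICT (by name: the statement is the Claim_ definition above) =====
theorem filter_accommodation_by_focus_py_spec : Claim_equal_filter_accommodation_by_focus_py := by
  intro text focus _
  unfold Spec_filter_accommodation_by_focus_py filter_accommodation_by_focus_py
    filter_accommodation_by_focus_py_alt
  simp only [pvALoop_eq, Bool.false_eq_true, if_false, List.nil_append, pvOut_dropWhile]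
  rfl
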